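-- pv_equiv track=rewrite | github.com/rhkdguskim/Study | Algorithm/python/programers/자동완성.py | solution
-- ===== SOURCE A (Python) =====
-- def solution(words):
--     class Node():
--         def __init__(self) -> None:
--             self.child = {}
--             self.data = None
--             self.cnt = 0
--
--     class Trie():
--         def __init__(self) -> None:
--             self.head = Node()
--
--         def insert(self, string):
--             current_node = self.head
--
--             for char in string:
--
--                 if char not in current_node.child:
--                     current_node.child[char] = Node()
--
--                 current_node = current_node.child[char]
--                 current_node.cnt += 1
--
--             current_node.data = string
--
--         def search(self, string):
--             cnt = 0
--             current_node = self.head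
--
--             for char in string:
--                 cnt += 1
--
--                 if char in current_node.child:
--                     current_node = current_node.child[char]
--
--                 if current_node.data == string or current_node.cnt == 1:
--                     return cnt
--
--
--     answer = 0
--     trie = Trie()
--     for w in words:
--         trie.insert(w)
--
--     for w in words:
--         answer += trie.search(w)
--
--     return answer
-- ===== SOURCE B (Python) =====
-- def solution(words):
--     def lcp(a, b):
--         n = 0
--         for x, y in zip(a, b):
--             if x != y:
--                 break
--             n += 1
--         return n
--
--     total = 0
--     for w in words:
--         if words.count(w) > 1:
--             total += len(w)
--         else:
--             m = 0
--             for u in words: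
--                 if u != w:
--                     m = max(m, lcp(w, u))
--             total += min(len(w), m + 1)
--     return total
-- ===== Notes on version B (the rewrite author's own statement) =====
-- stated objective: alternative
-- what changed: Replaces the trie (insert counts per node, then walk each word until its node count is 1 or its stored word matches) by a direct pairwise formulation: a word typed more than once costs its full length, otherwise its cost is min(len(w), 1 + max longest-common-prefix with any other distinct word); quadratic, so slower than the trie on large inputs.
-- crash fix: On any list containing the empty string '', A's search returns None and 'answer += None' raises TypeError; B returns 0 keystrokes for the empty word. — e.g. on solution([""]): A raises TypeError, B returns 0
import Mathlib
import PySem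

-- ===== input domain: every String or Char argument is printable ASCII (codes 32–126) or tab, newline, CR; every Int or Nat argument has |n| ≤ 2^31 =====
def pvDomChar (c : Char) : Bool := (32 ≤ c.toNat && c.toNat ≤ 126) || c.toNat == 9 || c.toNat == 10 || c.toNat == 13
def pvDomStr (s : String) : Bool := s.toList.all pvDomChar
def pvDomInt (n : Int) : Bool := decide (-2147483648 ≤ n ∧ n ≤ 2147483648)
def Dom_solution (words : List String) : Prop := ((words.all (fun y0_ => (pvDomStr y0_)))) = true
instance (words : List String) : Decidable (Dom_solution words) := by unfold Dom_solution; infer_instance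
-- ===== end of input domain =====

-- B replaces A's trie by a direct pairwise longest-common-prefix formulation (alternative
-- algorithm; quadratic in the number of words, so slower than the trie on large inputs).

-- ===== PORT A =====
-- A's trie of Node objects (child dict, cnt, data) is ported by hand (PySem has no trie):
-- a node is identified by its path from the root, the trie is a PySem.Dict from paths to
-- (cnt, data); "char in current_node.child" is key-membership of path ++ [char].  This is
-- exact: each Python node corresponds to exactly one path.

-- Trie.insert: walk the string, creating missing nodes, incrementing cnt on each visited
-- node, finally setting data at the full path.
def pvInsertGo (w : String) : PySem.Dict (List Char) (Int × Option String) → List Char → List Char → PySem.Dict (List Char) (Int × Option String)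
  | d, p, [] =>
      let e := (d.get? p).getD (0, none)
      d.insert p (e.1, some w)                  -- current_node.data = string
  | d, p, c :: cs =>
      let p' := p ++ [c]
      let d1 := if (d.get? p').isSome then d else d.insert p' (0, none)   -- if char not in child: new Node
      let e := (d1.get? p').getD (0, none)
      pvInsertGo w (d1.insert p' (e.1 + 1, e.2)) p' cs                    -- cnt += 1, move down

def pvInsert (d : PySem.Dict (List Char) (Int × Option String)) (w : String) : PySem.Dict (List Char) (Int × Option String) :=
  pvInsertGo w d [] w.toList

-- Trie.search: walk the string counting chars; return the count as soon as the node's data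
-- equals the searched string or its cnt is 1; fall off the end -> Python returns None.
def pvSearchGo (d : PySem.Dict (List Char) (Int × Option String)) (w : String) : List Char → Int → List Char → Option Int
  | _, _, [] => none
  | p, cnt, c :: cs =>
      let cnt' := cnt + 1
      let p' := if (d.get? (p ++ [c])).isSome then p ++ [c] else p
      let e := (d.get? p').getD (0, none)
      if e.2 == some w || e.1 == 1 then some cnt' else pvSearchGo d w p' cnt' cs

def solution (words : List String) : Int :=
  let trie := words.foldl pvInsert PySem.Dict.empty
  -- answer += trie.search(w); search returning None (empty word) raises TypeError in
  -- Python — those inputs are excluded by Pre_solution, `.getD 0` is never the value used.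
  words.foldl (fun a w => a + (pvSearchGo trie w [] 0 w.toList).getD 0) 0

-- ===== PORT B =====
-- lcp: loop over zip(a, b), break at first mismatch
def pvLcp : List Char → List Char → Int
  | x :: a, y :: b => if x = y then 1 + pvLcp a b else 0
  | _, _ => 0

def solution_alt (words : List String) : Int :=
  words.foldl (fun total w =>
    if 1 < PySem.List.count words w then
      total + PySem.Str.len w
    else
      let m := words.foldl (fun m u => if u ≠ w then max m (pvLcp w.toList u.toList) else m) 0
      total + min (PySem.Str.len w) (m + 1)) 0

-- ===== PRECONDITION & SPEC =====
-- Pre_ excludes lists containing the empty string: there A's search returns None and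
-- 'answer += None' raises TypeError.
def Pre_solution (words : List String) : Prop := ∀ w ∈ words, w ≠ ""
instance (words : List String) : Decidable (Pre_solution words) := by unfold Pre_solution; infer_instance

def pvWitness_solution : List String := (["go", "gone", "guild"])

-- On any list containing "", A's search returns None and the += raises TypeError; B counts 0 keystrokes for "".
def Raises_solution (words : List String) : Prop := "" ∈ words
instance (words : List String) : Decidable (Raises_solution words) := by unfold Raises_solution; infer_instance
def pvRaiseWitness_solution : List String := ([""])
def pvRaiseWitnessOut_solution : Int := 0

def Spec_solution (words : List String) (out : Int) : Prop := out = solution_alt words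
instance (words : List String) (out : Int) : Decidable (Spec_solution words out) := by unfold Spec_solution; infer_instance

-- ===== CLAIM (what is proved, stated in full; the proofs are below) =====
def Claim_equal_solution : Prop := ∀ (words : List String), Dom_solution words → Pre_solution words → Spec_solution words (solution words)
def Claim_raises_solution : Prop := (∀ (words : List String), Dom_solution words → Raises_solution words → ¬ Pre_solution words) ∧ (Dom_solution (pvRaiseWitness_solution) ∧ Raises_solution (pvRaiseWitness_solution) ∧ solution_alt (pvRaiseWitness_solution) = pvRaiseWitnessOut_solution)

-- ===== LEMMAS AND PROOFS =====

def pvCnt (d : PySem.Dict (List Char) (Int × Option String)) (q : List Char) : Int :=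
  ((d.get? q).getD (0, none)).1
def pvDat (d : PySem.Dict (List Char) (Int × Option String)) (q : List Char) : Option String :=
  ((d.get? q).getD (0, none)).2
def pvBelow (p cs q : List Char) : Prop := ∃ t, q = p ++ t ∧ t ≠ [] ∧ t <+: cs

theorem pvBelow_cons (p : List Char) (c : Char) (cs q : List Char) :
    pvBelow p (c :: cs) q ↔ q = p ++ [c] ∨ pvBelow (p ++ [c]) cs q := by
  constructor
  · rintro ⟨t, rfl, ht, hpre⟩
    match t, hpre with
    | [], _ => exact absurd rfl ht
    | a :: t', hpre =>
      obtain ⟨ha, hpre'⟩ : a = c ∧ t' <+: cs := by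
        rcases hpre with ⟨r, hr⟩; cases hr; exact ⟨rfl, ⟨_, rfl⟩⟩
      subst ha
      rcases eq_or_ne t' [] with rfl | ht'
      · exact Or.inl rfl
      · exact Or.inr ⟨t', by simp, ht', hpre'⟩
  · rintro (rfl | ⟨t, rfl, ht, hpre⟩)
    · exact ⟨[c], rfl, by simp, by simp⟩
    · exact ⟨c :: t, by simp, by simp, by simpa using hpre⟩

-- one step of A's insert walk, as a named abbreviation for the proofs
def pvStep (d : PySem.Dict (List Char) (Int × Option String)) (p' : List Char) : PySem.Dict (List Char) (Int × Option String) :=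
  let d1 := if (d.get? p').isSome then d else d.insert p' (0, none)
  let e := (d1.get? p').getD (0, none)
  d1.insert p' (e.1 + 1, e.2)

theorem pvInsertGo_cons (w : String) (d : PySem.Dict (List Char) (Int × Option String)) (p : List Char) (c : Char) (cs : List Char) :
    pvInsertGo w d p (c :: cs) = pvInsertGo w (pvStep d (p ++ [c])) (p ++ [c]) cs := rfl

theorem pvStep_get (d : PySem.Dict (List Char) (Int × Option String)) (p' q : List Char) :
    (pvStep d p').get? q = if q = p' then some (pvCnt d q + 1, pvDat d q) else d.get? q := by
  unfold pvStep
  by_cases hq : q = p'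
  · subst hq
    rw [if_pos rfl]
    simp only
    rw [PySem.Dict.get?_insert_self]
    by_cases hP : (d.get? q).isSome
    · rw [if_pos hP]
      obtain ⟨v, hv⟩ := Option.isSome_iff_exists.mp hP
      simp [pvCnt, pvDat, hv]
    · rw [if_neg hP, PySem.Dict.get?_insert_self]
      have : d.get? q = none := Option.not_isSome_iff_eq_none.mp hP
      simp [pvCnt, pvDat, this]
  · rw [if_neg hq]
    simp only
    rw [PySem.Dict.get?_insert_of_ne _ _ hq]
    by_cases hP : (d.get? p').isSome
    · rw [if_pos hP]
    · rw [if_neg hP, PySem.Dict.get?_insert_of_ne _ _ hq]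

theorem pvInsertGo_get (w : String) (cs : List Char) :
    ∀ (d : PySem.Dict (List Char) (Int × Option String)) (p q : List Char),
    (q = p ++ cs → (pvInsertGo w d p cs).get? q =
        some ((if cs = [] then pvCnt d q else pvCnt d q + 1), some w)) ∧
    (q ≠ p ++ cs → pvBelow p cs q → (pvInsertGo w d p cs).get? q = some (pvCnt d q + 1, pvDat d q)) ∧
    (q ≠ p ++ cs → ¬ pvBelow p cs q → (pvInsertGo w d p cs).get? q = d.get? q) := by
  induction cs with
  | nil =>
    intro d p q
    refine ⟨fun hq => ?_, fun hq hb => ?_, fun hq hb => ?_⟩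
    · simp only [List.append_nil] at hq; subst hq
      simp only [pvInsertGo]
      rw [PySem.Dict.get?_insert_self]
      simp [pvCnt]
    · rcases hb with ⟨t, rfl, ht, hpre⟩
      simp at hpre; exact absurd hpre ht
    · simp only [List.append_nil] at hq
      simp only [pvInsertGo]
      rw [PySem.Dict.get?_insert_of_ne _ _ hq]
  | cons c cs ih =>
    intro d p q
    rw [pvInsertGo_cons]
    obtain ⟨ih1, ih2, ih3⟩ := ih (pvStep d (p ++ [c])) (p ++ [c]) q
    have hoff : q ≠ p ++ [c] → pvCnt (pvStep d (p ++ [c])) q = pvCnt d q ∧ pvDat (pvStep d (p ++ [c])) q = pvDat d q := by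
      intro h
      refine ⟨?_, ?_⟩ <;> simp only [pvCnt, pvDat] <;> rw [pvStep_get, if_neg h]
    have hat : q = p ++ [c] → pvCnt (pvStep d (p ++ [c])) q = pvCnt d q + 1 := by
      intro h; simp only [pvCnt]; rw [pvStep_get, if_pos h]; rfl
    refine ⟨fun hq => ?_, fun hq hb => ?_, fun hq hb => ?_⟩
    · rcases eq_or_ne cs [] with rfl | hcs
      · have hq' : q = p ++ [c] := by simpa using hq
        rw [ih1 (by simp [hq']), if_pos rfl, if_neg (by simp), hat hq']
      · have hq'' : q ≠ p ++ [c] := by subst hq; simp [hcs]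
        rw [ih1 (by simp [hq]), if_neg hcs, if_neg (by simp), (hoff hq'').1]
    · rcases (pvBelow_cons p c cs q).mp hb with hq' | hb'
      · have hbne : ¬ pvBelow (p ++ [c]) cs q := by
          rintro ⟨t, ht0, ht, -⟩
          rw [hq'] at ht0
          have : ([] : List Char) = t := by simpa using ht0
          exact ht this.symm
        have hne2 : q ≠ (p ++ [c]) ++ cs := by
          intro h; apply hq; rw [h]; simp
        rw [ih3 hne2 hbne, pvStep_get, if_pos hq']
      · have hq'' : q ≠ p ++ [c] := by
          rintro rfl
          rcases hb' with ⟨t, ht0, ht, -⟩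
          have : ([] : List Char) = t := by simpa using ht0
          exact ht this.symm
        have hne2 : q ≠ (p ++ [c]) ++ cs := by
          intro h; apply hq; rw [h]; simp
        rw [ih2 hne2 hb', (hoff hq'').1, (hoff hq'').2]
    · have hb1 : q ≠ p ++ [c] := fun h => hb ((pvBelow_cons p c cs q).mpr (Or.inl h))
      have hb2 : ¬ pvBelow (p ++ [c]) cs q := fun h => hb ((pvBelow_cons p c cs q).mpr (Or.inr h))
      have hne2 : q ≠ (p ++ [c]) ++ cs := by
        intro h; apply hq; rw [h]; simp
      rw [ih3 hne2 hb2, pvStep_get, if_neg hb1]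

theorem pvBelow_nil_left (cs q : List Char) : pvBelow [] cs q ↔ q ≠ [] ∧ q <+: cs := by
  constructor
  · rintro ⟨t, rfl, ht, hpre⟩; simpa using ⟨ht, hpre⟩
  · rintro ⟨h1, h2⟩; exact ⟨q, by simp, h1, h2⟩

theorem pvInsert_cnt (d : PySem.Dict (List Char) (Int × Option String)) (w : String) (q : List Char) :
    pvCnt (pvInsert d w) q = pvCnt d q + (if q ≠ [] ∧ q <+: w.toList then 1 else 0) := by
  obtain ⟨h1, h2, h3⟩ := pvInsertGo_get w w.toList d [] q
  by_cases hq : q = ([] : List Char) ++ w.toList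
  · simp only [List.nil_append] at hq
    subst hq
    rcases eq_or_ne (w.toList) [] with hnil | hnil
    · rw [hnil] at h1 ⊢
      simp only [pvCnt, pvInsert, hnil, h1 rfl]
      simp
    · simp only [pvCnt, pvInsert, h1 (by simp), if_neg hnil]
      simp [hnil]
  · simp only [List.nil_append] at hq
    by_cases hb : pvBelow [] w.toList q
    · have := (pvBelow_nil_left _ _).mp hb
      simp only [pvCnt, pvInsert, h2 (by simpa using hq) hb, if_pos this]
      rfl
    · rw [pvBelow_nil_left] at hb
      have hcond : ¬ (q ≠ [] ∧ q <+: w.toList) := hb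
      simp only [pvCnt, pvInsert, h3 (by simpa using hq) (by rwa [pvBelow_nil_left]), if_neg hcond, add_zero]

theorem pvInsert_dat (d : PySem.Dict (List Char) (Int × Option String)) (w : String) (q : List Char) :
    pvDat (pvInsert d w) q = if q = w.toList then some w else pvDat d q := by
  obtain ⟨h1, h2, h3⟩ := pvInsertGo_get w w.toList d [] q
  by_cases hq : q = w.toList
  · simp only [pvDat, pvInsert, h1 (by simpa using hq), if_pos hq]
    rfl
  · rw [if_neg hq]
    by_cases hb : pvBelow [] w.toList q
    · simp only [pvDat, pvInsert, h2 (by simpa using hq) hb]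
      rfl
    · simp only [pvDat, pvInsert, h3 (by simpa using hq) hb]

theorem pvInsert_key_mono (d : PySem.Dict (List Char) (Int × Option String)) (w : String) (q : List Char)
    (h : (d.get? q).isSome) : ((pvInsert d w).get? q).isSome := by
  obtain ⟨h1, h2, h3⟩ := pvInsertGo_get w w.toList d [] q
  by_cases hq : q = w.toList
  · rw [pvInsert, h1 (by simpa using hq)]; rfl
  · by_cases hb : pvBelow [] w.toList q
    · rw [pvInsert, h2 (by simpa using hq) hb]; rfl
    · rw [pvInsert, h3 (by simpa using hq) hb]; exact h

theorem pvInsert_key_of (d : PySem.Dict (List Char) (Int × Option String)) (w : String) (q : List Char)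
    (hq : q ≠ []) (hpre : q <+: w.toList) : ((pvInsert d w).get? q).isSome := by
  obtain ⟨h1, h2, h3⟩ := pvInsertGo_get w w.toList d [] q
  by_cases hqe : q = w.toList
  · rw [pvInsert, h1 (by simpa using hqe)]; rfl
  · rw [pvInsert, h2 (by simpa using hqe) ((pvBelow_nil_left _ _).mpr ⟨hq, hpre⟩)]; rfl

theorem pvBuild_cnt (ws : List String) : ∀ (d : PySem.Dict (List Char) (Int × Option String)) (q : List Char),
    pvCnt (ws.foldl pvInsert d) q =
      pvCnt d q + (if q = [] then 0 else (ws.countP (fun u => q.isPrefixOf u.toList) : Int)) := by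
  induction ws with
  | nil => intro d q; simp
  | cons w ws ih =>
    intro d q
    rw [List.foldl_cons, ih, pvInsert_cnt, List.countP_cons]
    rcases eq_or_ne q [] with rfl | hq
    · simp
    · have : q.isPrefixOf w.toList = true ↔ q <+: w.toList := List.isPrefixOf_iff_prefix
      by_cases hp : q <+: w.toList
      · rw [if_pos ⟨hq, hp⟩, if_neg hq, if_neg hq, if_pos (this.mpr hp)]
        push_cast; ring
      · rw [if_neg (by tauto), if_neg hq, if_neg hq, if_neg (by rw [this]; exact hp)]
        push_cast; ring

theorem pvBuild_dat (ws : List String) : ∀ (d : PySem.Dict (List Char) (Int × Option String)) (q : List Char),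
    pvDat (ws.foldl pvInsert d) q =
      if ws.any (fun u => u.toList == q) then some (String.ofList q) else pvDat d q := by
  induction ws with
  | nil => intro d q; simp
  | cons w ws ih =>
    intro d q
    rw [List.foldl_cons, ih]
    by_cases ha : ws.any (fun u => u.toList == q) = true
    · simp [ha]
    · rw [if_neg ha, pvInsert_dat]
      by_cases hw : w.toList = q
      · subst hw
        simp [ha, String.ofList_toList]
      · simp [ha, hw, Ne.symm hw]

theorem pvBuild_key_mono (ws : List String) : ∀ (d : PySem.Dict (List Char) (Int × Option String)) (q : List Char),
    (d.get? q).isSome → (((ws.foldl pvInsert d).get? q)).isSome := by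
  induction ws with
  | nil => intro d q h; exact h
  | cons w ws ih => intro d q h; exact ih _ q (pvInsert_key_mono d w q h)

theorem pvBuild_key (ws : List String) (d : PySem.Dict (List Char) (Int × Option String))
    (q : List Char) (hq : q ≠ []) (w : String) (hw : w ∈ ws) (hpre : q <+: w.toList) :
    ((ws.foldl pvInsert d).get? q).isSome := by
  induction ws generalizing d with
  | nil => cases hw
  | cons x ws ih =>
    rcases List.mem_cons.mp hw with rfl | hw'
    · exact pvBuild_key_mono ws _ q (pvInsert_key_of d w q hq hpre)
    · exact ih _ hw'

theorem pvSearch_loop (words : List String) (w : String) (hw : w ∈ words) (T : Nat)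
    (_hT1 : 1 ≤ T) (hT2 : T ≤ w.toList.length)
    (hlt : ∀ k, 1 ≤ k → k < T → words.countP (fun u => (w.toList.take k).isPrefixOf u.toList) ≠ 1)
    (hgood : T < w.toList.length → words.countP (fun u => (w.toList.take T).isPrefixOf u.toList) = 1) :
    ∀ (cs : List Char) (i : Nat), cs = w.toList.drop i → i < T →
      pvSearchGo (words.foldl pvInsert PySem.Dict.empty) w (w.toList.take i) (i : Int) cs = some (T : Int) := by
  set l := w.toList with hl
  set d := words.foldl pvInsert PySem.Dict.empty with hd
  have fcnt : ∀ q : List Char, q ≠ [] → pvCnt d q = (words.countP (fun u => q.isPrefixOf u.toList) : Int) := by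
    intro q hq
    rw [hd, pvBuild_cnt, if_neg hq]
    simp [pvCnt, PySem.Dict.get?_empty]
  have fdat : ∀ q : List Char, pvDat d q =
      (if words.any (fun u => u.toList == q) then some (String.ofList q) else none) := by
    intro q
    rw [hd, pvBuild_dat]
    simp [pvDat, PySem.Dict.get?_empty]
  intro cs
  induction cs with
  | nil =>
    intro i hcs hiT
    have : l.length ≤ i := List.drop_eq_nil_iff.mp hcs.symm
    omega
  | cons c cs' ih =>
    intro i hcs hiT
    have hi : i < l.length := by
      by_contra h
      rw [List.drop_eq_nil_iff.mpr (by omega)] at hcs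
      cases hcs
    have hdrop := List.drop_eq_getElem_cons hi
    rw [← hcs] at hdrop
    injection hdrop with hc1 hcs'
    subst hc1
    have htake : l.take i ++ [l[i]] = l.take (i + 1) := (List.take_succ_eq_append_getElem hi).symm
    have hkey : ((d.get? (l.take (i + 1))).isSome) = true := by
      rw [hd]
      refine pvBuild_key words _ _ ?_ w hw (by rw [hl]; exact List.take_prefix _ _)
      intro h
      have hlen := congrArg List.length h
      rw [List.length_take, List.length_nil] at hlen
      omega
    simp only [pvSearchGo, htake, hkey, if_true]
    have hcnt : ((d.get? (l.take (i + 1))).getD (0, none)).1 =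
        (words.countP (fun u => (l.take (i + 1)).isPrefixOf u.toList) : Int) :=
      fcnt _ (by
        intro h
        have hlen := congrArg List.length h
        rw [List.length_take, List.length_nil] at hlen
        omega)
    have hdat : ((d.get? (l.take (i + 1))).getD (0, none)).2 =
        (if words.any (fun u => u.toList == l.take (i + 1)) then some (String.ofList (l.take (i + 1))) else none) :=
      fdat _
    by_cases hend : i + 1 = l.length
    · -- data hit: node is the whole word
      have htl : l.take (i + 1) = l := by rw [hend]; simp
      have hany : words.any (fun u => u.toList == l) = true :=
        List.any_eq_true.mpr ⟨w, hw, by simp [hl]⟩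
      have : ((d.get? (l.take (i + 1))).getD (0, none)).2 = some w := by
        rw [hdat, htl, if_pos hany]
        congr 1
        rw [hl, String.ofList_toList]
      rw [this]
      have hT : T = i + 1 := by omega
      simp [hT]
    · -- not the final node: data ≠ w
      have hdne : (((d.get? (l.take (i + 1))).getD (0, none)).2 == some w) = false := by
        rw [hdat]
        by_cases hany : words.any (fun u => u.toList == l.take (i + 1)) = true
        · rw [if_pos hany]
          simp only [beq_eq_false_iff_ne, ne_eq, Option.some.injEq]
          intro h
          have : (String.ofList (l.take (i + 1))).toList = w.toList := by rw [h]
          rw [String.toList_ofList] at this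
          have : (l.take (i + 1)).length = l.length := by rw [this, hl]
          simp [List.length_take] at this
          omega
        · rw [if_neg hany]; rfl
      rw [hdne, Bool.false_or]
      by_cases hiT1 : i + 1 = T
      · have hgood' := hgood (by omega)
        have : (((d.get? (l.take (i + 1))).getD (0, none)).1 == (1 : Int)) = true := by
          rw [hcnt, hiT1, hgood']
          simp
        rw [this]
        norm_num
        omega
      · have hne1 := hlt (i + 1) (by omega) (by omega)
        have : (((d.get? (l.take (i + 1))).getD (0, none)).1 == (1 : Int)) = false := by
          rw [hcnt]
          simp only [beq_eq_false_iff_ne, ne_eq]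
          intro h
          exact hne1 (by exact_mod_cast h)
        simp only [this, Bool.false_eq_true, if_false]
        have hih := ih (i + 1) hcs' (by omega)
        rw [← hih]
        norm_num

theorem pvLcp_nonneg (a b : List Char) : 0 ≤ pvLcp a b := by
  fun_induction pvLcp a b
  all_goals omega

theorem pvPrefix_iff_le_lcp (k : Nat) (l a : List Char) (hk : k ≤ l.length) :
    l.take k <+: a ↔ (k : Int) ≤ pvLcp l a := by
  induction k generalizing l a with
  | zero => simpa using pvLcp_nonneg l a
  | succ k ih =>
    match l, a with
    | [], _ => simp at hk
    | x :: l, [] =>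
      simp only [List.take_succ_cons, pvLcp]
      constructor
      · intro h; exact absurd h (by simp)
      · intro h; omega
    | x :: l, y :: a =>
      simp only [List.take_succ_cons, pvLcp]
      by_cases hxy : x = y
      · subst hxy
        rw [if_pos rfl]
        rw [List.cons_prefix_cons]
        simp only [true_and]
        rw [ih l a (by simpa using hk)]
        omega
      · rw [if_neg hxy, List.cons_prefix_cons]
        constructor
        · rintro ⟨h, -⟩; exact absurd h hxy
        · intro h; omega

theorem pvFoldMax_le_iff (l : List String) (w : String) (f : String → Int) :
    ∀ (a c : Int),
    l.foldl (fun m u => if u ≠ w then max m (f u) else m) a ≤ c ↔ a ≤ c ∧ ∀ u ∈ l, u ≠ w → f u ≤ c := by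
  induction l with
  | nil => intro a c; simp
  | cons x l ih =>
    intro a c
    simp only [List.foldl_cons]
    by_cases hx : x ≠ w
    · simp only [if_pos hx, ih, max_le_iff]
      constructor
      · rintro ⟨⟨h1, h2⟩, h3⟩
        refine ⟨h1, fun u hu hne => ?_⟩
        rcases List.mem_cons.mp hu with rfl | hu
        exacts [h2, h3 u hu hne]
      · rintro ⟨h1, h2⟩
        exact ⟨⟨h1, h2 x (by simp) hx⟩, fun u hu hne => h2 u (by simp [hu]) hne⟩
    · simp only [if_neg hx, ih]
      rw [not_not] at hx
      constructor
      · rintro ⟨h1, h2⟩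
        refine ⟨h1, fun u hu hne => ?_⟩
        rcases List.mem_cons.mp hu with rfl | hu
        exacts [absurd hx hne, h2 u hu hne]
      · rintro ⟨h1, h2⟩
        exact ⟨h1, fun u hu hne => h2 u (by simp [hu]) hne⟩

theorem pvCountP_eq_one (l : List String) (P : String → Bool) (w : String)
    (hw : w ∈ l) (hP : P w = true) (hc : l.count w = 1) :
    (l.countP P = 1 ↔ ∀ u ∈ l, P u = true → u = w) := by
  constructor
  · intro h
    have hlen : (l.filter P).length = 1 := by rw [← List.countP_eq_length_filter]; exact h
    obtain ⟨a, ha⟩ := List.length_eq_one_iff.mp hlen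
    have hwa : w = a := by
      have : w ∈ l.filter P := List.mem_filter.mpr ⟨hw, hP⟩
      rw [ha] at this
      simpa using this
    intro u hu hPu
    have : u ∈ l.filter P := List.mem_filter.mpr ⟨hu, hPu⟩
    rw [ha] at this
    simp at this
    rw [this, ← hwa]
  · intro h
    have : l.countP P = l.countP (fun u => u == w) := by
      apply List.countP_congr
      intro u hu
      constructor
      · intro hPu; simp [h u hu hPu]
      · intro hbeq
        have : u = w := by simpa using hbeq
        rw [this]; exact hP
    rw [this, ← List.count_eq_countP]
    exact hc

theorem pvPerWord (words : List String) (w : String) (hw : w ∈ words) (hne : w ≠ "") :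
    (pvSearchGo (words.foldl pvInsert PySem.Dict.empty) w [] 0 w.toList).getD 0 =
      (if 1 < PySem.List.count words w then PySem.Str.len w
       else min (PySem.Str.len w)
         ((words.foldl (fun m u => if u ≠ w then max m (pvLcp w.toList u.toList) else m) 0) + 1)) := by
  have hlnil : w.toList ≠ [] := by
    intro hl
    apply hne
    have := congrArg String.ofList hl
    rwa [String.ofList_toList] at this
  have hlen1 : 1 ≤ w.toList.length := by
    cases h : w.toList with
    | nil => exact absurd h hlnil
    | cons a as => simp
  have hcpos : 1 ≤ words.count w := List.count_pos_iff.mpr hw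
  rw [PySem.List.count_eq, PySem.Str.len_eq]
  by_cases hdup : 1 < words.count w
  · rw [if_pos hdup]
    have hloop := pvSearch_loop words w hw w.toList.length hlen1 le_rfl
      (fun k hk1 hkT => by
        intro hone
        have hmono : words.count w ≤ words.countP (fun u => (w.toList.take k).isPrefixOf u.toList) := by
          rw [List.count_eq_countP]
          apply List.countP_mono_left
          intro u hu hbeq
          have : u = w := by simpa using hbeq
          subst this
          exact List.isPrefixOf_iff_prefix.mpr (List.take_prefix _ _)
        omega)
      (fun h => absurd h (by omega))
      w.toList 0 (by simp) (by omega)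
    simp only [List.take_zero, Nat.cast_zero] at hloop
    rw [hloop]
    rfl
  · rw [if_neg hdup]
    have hcount1 : words.count w = 1 := by omega
    set mI := words.foldl (fun m u => if u ≠ w then max m (pvLcp w.toList u.toList) else m) 0 with hmI
    have hiff := pvFoldMax_le_iff words w (fun u => pvLcp w.toList u.toList)
    have h0 : 0 ≤ mI ∧ ∀ u ∈ words, u ≠ w → pvLcp w.toList u.toList ≤ mI := (hiff 0 mI).mp le_rfl
    set mN := mI.toNat with hmN
    have hcast : (mN : Int) = mI := Int.toNat_of_nonneg h0.1
    set T := min w.toList.length (mN + 1) with hT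
    have hGood : ∀ k : Nat, 1 ≤ k → k ≤ w.toList.length →
        (words.countP (fun u => (w.toList.take k).isPrefixOf u.toList) = 1 ↔ mI < (k : Int)) := by
      intro k hk1 hklen
      rw [pvCountP_eq_one words _ w hw
        (List.isPrefixOf_iff_prefix.mpr (List.take_prefix _ _)) hcount1]
      constructor
      · intro h
        have : mI ≤ (k : Int) - 1 := by
          rw [hmI, hiff]
          refine ⟨by omega, fun u hu hne' => ?_⟩
          have hnp : ¬ (w.toList.take k).isPrefixOf u.toList = true := by
            intro hp
            exact hne' (h u hu hp)
          rw [List.isPrefixOf_iff_prefix] at hnp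
          rw [pvPrefix_iff_le_lcp k _ _ hklen] at hnp
          omega
        omega
      · intro h u hu hPu
        by_contra hne'
        have := h0.2 u hu hne'
        rw [List.isPrefixOf_iff_prefix, pvPrefix_iff_le_lcp k _ _ hklen] at hPu
        omega
    have hloop := pvSearch_loop words w hw T (by omega) (by omega)
      (fun k hk1 hkT => by
        intro hone
        have := (hGood k hk1 (by omega)).mp hone
        omega)
      (fun hTlen => by
        have hTm : T = mN + 1 := by omega
        rw [hTm]
        exact (hGood (mN + 1) (by omega) (by omega)).mpr (by omega))
      w.toList 0 (by simp) (by omega)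
    simp only [List.take_zero, Nat.cast_zero] at hloop
    rw [hloop]
    simp only [Option.getD_some]
    rw [hT]
    push_cast
    omega

-- ===== VERDICT (by name: the statement is the Claim_ definition above) =====
theorem solution_spec : Claim_equal_solution := by
  intro words _ hpre
  unfold Spec_solution solution solution_alt
  refine PySem.List.foldl_congr_mem _ _ _ _ (fun acc w hw => ?_)
  rw [pvPerWord words w hw (hpre w hw)]
  split_ifs <;> ring

def solution_raises : Claim_raises_solution := by
  unfold Claim_raises_solution
  constructor
  · intro words _ hr hprev
    exact (hprev "" hr) rfl
  · exact ⟨by decide, by decide, by decide⟩
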